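-- pv_equiv track=rewrite | github.com/Andhan01/cs525_26sp | 525_hw2.py | build_2d_mesh
-- ===== SOURCE A (Python) =====
-- import math
--
-- def build_2d_mesh(p):
--     n = int(math.sqrt(p))
--     adj = {i: set() for i in range(p)}
--
--     for r in range(n):
--         for c in range(n):
--             idx = r * n + c
--             if r + 1 < n:
--                 adj[idx].add((r+1)*n + c)
--                 adj[(r+1)*n + c].add(idx)
--             if c + 1 < n:
--                 adj[idx].add(r*n + (c+1))
--                 adj[r*n + (c+1)].add(idx)
--
--     return adj
-- ===== SOURCE B (Python) =====
-- import math
--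
-- def build_2d_mesh(p):
--     n = int(math.sqrt(p))
--
--     def neighbors(i):
--         r, c = divmod(i, n)
--         out = set()
--         if r >= 1:
--             out.add(i - n)
--         if c >= 1:
--             out.add(i - 1)
--         if r + 1 < n:
--             out.add(i + n)
--         if c + 1 < n:
--             out.add(i + 1)
--         return out
--
--     return {i: neighbors(i) if i < n * n else set() for i in range(p)}
-- ===== Notes on version B (the rewrite author's own statement) =====
-- stated objective: simpler
-- what changed: A builds the adjacency dict imperatively, discovering each edge once per cell and inserting it into both endpoints' sets (edge-with-mirror); B computes each node's whole neighbor set independently with a pure closed-form function (divmod decode, neighbors i±n / i±1) and returns one dict comprehension, with no cross-node mutation.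
import Mathlib
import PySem

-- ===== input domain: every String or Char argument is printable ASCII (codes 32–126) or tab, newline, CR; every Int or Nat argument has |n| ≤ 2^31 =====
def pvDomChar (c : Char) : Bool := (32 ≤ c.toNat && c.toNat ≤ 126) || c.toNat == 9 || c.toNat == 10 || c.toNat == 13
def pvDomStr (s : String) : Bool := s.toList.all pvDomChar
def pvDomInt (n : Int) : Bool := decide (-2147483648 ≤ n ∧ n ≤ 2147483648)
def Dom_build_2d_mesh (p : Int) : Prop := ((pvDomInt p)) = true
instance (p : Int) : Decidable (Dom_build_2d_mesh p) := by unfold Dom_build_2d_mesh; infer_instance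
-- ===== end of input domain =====

-- B replaces A's imperative edge-with-mirror dict mutation by a pure per-node closed-form
-- neighbor function and one comprehension (objective: simpler). Return-value equivalence only.

-- ===== PORT A =====
-- int(math.sqrt(p)) is ported as Int.sqrt p: exact on the admitted 0 ≤ p ≤ 2^31, where
-- math.sqrt (correctly rounded) never crosses an integer boundary; p < 0 raises ValueError
-- in Python and is excluded by Pre_.  adj[k].add(v) on a key k that is always present is
-- ported as Dict.modify k [] (Set.add · v), which is exact for present keys.
def build_2d_mesh (p : Int) : List (Int × List Int) :=
  let n := Int.sqrt p
  let adj : PySem.Dict Int (PySem.Set Int) :=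
    (PySem.List.pyRange 0 p 1).foldl (fun d i => d.insert i PySem.Set.empty) PySem.Dict.empty
  let adj := (PySem.List.pyRange 0 n 1).foldl (fun d r =>
    (PySem.List.pyRange 0 n 1).foldl (fun d c =>
      let idx := r * n + c
      let d := if r + 1 < n then
          let d := d.modify idx [] (fun s => PySem.Set.add s ((r+1)*n + c))
          d.modify ((r+1)*n + c) [] (fun s => PySem.Set.add s idx)
        else d
      let d := if c + 1 < n then
          let d := d.modify idx [] (fun s => PySem.Set.add s (r*n + (c+1)))
          d.modify (r*n + (c+1)) [] (fun s => PySem.Set.add s idx)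
        else d
      d) d) adj
  adj.items

-- ===== PORT B =====
def build2dNeighbors (n i : Int) : PySem.Set Int :=
  let r := PySem.Int.floordiv i n
  let c := PySem.Int.mod i n
  let out : PySem.Set Int := PySem.Set.empty
  let out := if 1 ≤ r then PySem.Set.add out (i - n) else out
  let out := if 1 ≤ c then PySem.Set.add out (i - 1) else out
  let out := if r + 1 < n then PySem.Set.add out (i + n) else out
  let out := if c + 1 < n then PySem.Set.add out (i + 1) else out
  out

def build_2d_mesh_alt (p : Int) : List (Int × List Int) :=
  let n := Int.sqrt p
  (PySem.List.pyRange 0 p 1).map (fun i =>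
    (i, if i < n * n then build2dNeighbors n i else PySem.Set.empty))

-- ===== PRECONDITION & SPEC =====
-- Pre_ excludes exactly p < 0, where math.sqrt(p) raises ValueError (in A and in B alike).
def Pre_build_2d_mesh (p : Int) : Prop := 0 ≤ p
instance (p : Int) : Decidable (Pre_build_2d_mesh p) := by unfold Pre_build_2d_mesh; infer_instance
def pvWitness_build_2d_mesh : Int := 10

def Spec_build_2d_mesh (p : Int) (out : List (Int × List Int)) : Prop := out = build_2d_mesh_alt p
instance (p : Int) (out : List (Int × List Int)) : Decidable (Spec_build_2d_mesh p out) := by unfold Spec_build_2d_mesh; infer_instance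

-- ===== CLAIM (what is proved, stated in full; the proofs are below) =====
def Claim_equal_build_2d_mesh : Prop := ∀ (p : Int), Dom_build_2d_mesh p → Pre_build_2d_mesh p → Spec_build_2d_mesh p (build_2d_mesh p)

-- ===== LEMMAS AND PROOFS =====

-- the dict update one edge-endpoint event performs
def meshStep (d : PySem.Dict Int (PySem.Set Int)) (e : Int × Int) : PySem.Dict Int (PySem.Set Int) :=
  d.modify e.1 [] (fun s => PySem.Set.add s e.2)

-- the (key, added-value) events A's body performs at cell (r, c), in order
def evCell (n r c : Int) : List (Int × Int) :=
  (if r + 1 < n then [(r*n+c, (r+1)*n+c), ((r+1)*n+c, r*n+c)] else []) ++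
  (if c + 1 < n then [(r*n+c, r*n+(c+1)), (r*n+(c+1), r*n+c)] else [])

def evAll (n : Int) : List (Int × Int) :=
  (PySem.List.pyRange 0 n 1).flatMap (fun r => (PySem.List.pyRange 0 n 1).flatMap (evCell n r))

-- the neighbor list of node k as a plain concatenation, in A's insertion order (up, left, down, right)
def nbrList (n k : Int) : List Int :=
  (if 1 ≤ PySem.Int.floordiv k n then [k - n] else []) ++
  (if 1 ≤ PySem.Int.mod k n then [k - 1] else []) ++
  (if PySem.Int.floordiv k n + 1 < n then [k + n] else []) ++
  (if PySem.Int.mod k n + 1 < n then [k + 1] else [])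

theorem sqrt_sq_le (p : Int) (h : 0 ≤ p) : Int.sqrt p * Int.sqrt p ≤ p := by
  have h1 : Int.sqrt p = ↑(Nat.sqrt p.toNat) := by simp [Int.sqrt]
  rw [h1]
  have := Nat.sqrt_le' p.toNat
  have h2 : (Nat.sqrt p.toNat * Nat.sqrt p.toNat : Int) ≤ (p.toNat : Int) := by
    exact_mod_cast Nat.pow_two _ ▸ this
  omega

-- grid codes are injective
theorem code_inj (n r c r' c' : Int) (hc0 : 0 ≤ c) (hcn : c < n) (hc0' : 0 ≤ c') (hcn' : c' < n) :
    r * n + c = r' * n + c' ↔ r = r' ∧ c = c' := by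
  constructor
  · intro h
    rcases lt_trichotomy r r' with hlt | heq | hgt
    · nlinarith
    · constructor <;> [exact heq; nlinarith]
    · nlinarith
  · rintro ⟨rfl, rfl⟩; rfl

-- decoding: for 0 ≤ k < n*n, k = (k//n)*n + k%n with both components in range
theorem decode_bounds (n k : Int) (hn : 0 < n) (hk0 : 0 ≤ k) (hkn : k < n * n) :
    0 ≤ PySem.Int.floordiv k n ∧ PySem.Int.floordiv k n < n ∧
    0 ≤ PySem.Int.mod k n ∧ PySem.Int.mod k n < n ∧
    PySem.Int.floordiv k n * n + PySem.Int.mod k n = k := by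
  refine ⟨?_, ?_, PySem.Int.mod_nonneg _ hn, PySem.Int.mod_lt _ hn, PySem.Int.floordiv_mul_add_mod k n⟩
  · rw [PySem.Int.le_floordiv_iff_mul_le hn]; omega
  · rw [PySem.Int.floordiv_lt_iff_lt_mul hn]; exact hkn

theorem flatMap_pyRange_zero {α : Type} (h : Int → List α) (a b : Int)
    (hz : ∀ x, a ≤ x → x < b → h x = []) : (PySem.List.pyRange a b 1).flatMap h = [] := by
  refine List.flatMap_eq_nil_iff.mpr (fun x hx => ?_)
  rw [PySem.List.mem_pyRange_one] at hx
  exact hz x hx.1 hx.2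

-- a flatMap over range a..b of a function vanishing off {t1, t2}
theorem flatMap_pyRange_support2 {α : Type} (h : Int → List α) (a b t1 t2 : Int)
    (h12 : t1 < t2) (ht2a : a ≤ t2) (ht2b : t2 < b)
    (hz : ∀ x, a ≤ x → x < b → x ≠ t1 → x ≠ t2 → h x = []) :
    (PySem.List.pyRange a b 1).flatMap h = (if a ≤ t1 then h t1 else []) ++ h t2 := by
  rw [PySem.List.pyRange_one_append a t2 b ht2a (le_of_lt ht2b), List.flatMap_append,
    PySem.List.pyRange_one_cons ht2b, List.flatMap_cons]
  have htail : (PySem.List.pyRange (t2+1) b 1).flatMap h = [] :=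
    flatMap_pyRange_zero h _ _ (fun x hx1 hx2 => hz x (by omega) hx2 (by omega) (by omega))
  rw [htail, List.append_nil]
  by_cases h1 : a ≤ t1
  · rw [if_pos h1, PySem.List.pyRange_one_append a t1 t2 h1 (le_of_lt h12), List.flatMap_append,
      PySem.List.pyRange_one_cons h12, List.flatMap_cons]
    have h2 : (PySem.List.pyRange a t1 1).flatMap h = [] :=
      flatMap_pyRange_zero h _ _ (fun x hx1 hx2 => hz x hx1 (by omega) (by omega) (by omega))
    have h3 : (PySem.List.pyRange (t1+1) t2 1).flatMap h = [] :=
      flatMap_pyRange_zero h _ _ (fun x hx1 hx2 => hz x (by omega) (by omega) (by omega) (by omega))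
    rw [h2, h3]; simp
  · rw [if_neg h1]
    have h2 : (PySem.List.pyRange a t2 1).flatMap h = [] :=
      flatMap_pyRange_zero h _ _ (fun x hx1 hx2 => hz x hx1 (by omega) (by omega) (by omega))
    simp [h2]

-- ===== per-cell filtered values of A's event stream, target key k = rk*n+ck =====

theorem cellF_self (n k rk ck : Int) (hck : 0 ≤ ck) (hckn : ck < n) (hkey : k = rk * n + ck) :
    ((evCell n rk ck).filter (fun e => e.1 == k)).map (·.2) =
      (if rk + 1 < n then [k + n] else []) ++ (if ck + 1 < n then [k + 1] else []) := by
  have hbA : ((rk * n + ck) == k) = true := beq_iff_eq.mpr hkey.symm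
  have hbD : (((rk+1) * n + ck) == k) = false := by
    rw [beq_eq_false_iff_ne, Ne, hkey, code_inj n (rk+1) ck rk ck hck hckn hck hckn]; omega
  have hbR : ck + 1 < n → ((rk * n + (ck+1)) == k) = false := fun g4 => by
    rw [beq_eq_false_iff_ne, Ne, hkey, code_inj n rk (ck+1) rk ck (by omega) g4 hck hckn]; omega
  have vD : (rk+1) * n + ck = k + n := by rw [hkey]; ring
  have vR : rk * n + (ck+1) = k + 1 := by rw [hkey]; ring
  by_cases g3 : rk + 1 < n <;> by_cases g4 : ck + 1 < n <;>
    (simp [evCell, g3, g4, hbA, hbD, hbR]) <;> simp [vD, vR]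

theorem cellF_up (n k rk ck : Int) (hrk1 : 1 ≤ rk) (hrkn : rk < n)
    (hck : 0 ≤ ck) (hckn : ck < n) (hkey : k = rk * n + ck) :
    ((evCell n (rk-1) ck).filter (fun e => e.1 == k)).map (·.2) = [k - n] := by
  unfold evCell
  rw [show rk - 1 + 1 = rk from by ring]
  have hbA : (((rk-1) * n + ck) == k) = false := by
    rw [beq_eq_false_iff_ne, Ne, hkey, code_inj n (rk-1) ck rk ck hck hckn hck hckn]; omega
  have hbD : ((rk * n + ck) == k) = true := beq_iff_eq.mpr hkey.symm
  have hbR : ck + 1 < n → (((rk-1) * n + (ck+1)) == k) = false := fun g4 => by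
    rw [beq_eq_false_iff_ne, Ne, hkey, code_inj n (rk-1) (ck+1) rk ck (by omega) g4 hck hckn]; omega
  have vA : (rk-1) * n + ck = k - n := by rw [hkey]; ring
  rw [if_pos hrkn]
  by_cases g4 : ck + 1 < n <;> (simp [g4, hbA, hbD, hbR]) <;> simp [vA]

theorem cellF_left (n k rk ck : Int) (hrk : 0 ≤ rk) (hrkn : rk < n) (hck1 : 1 ≤ ck) (hckn : ck < n)
    (hkey : k = rk * n + ck) :
    ((evCell n rk (ck-1)).filter (fun e => e.1 == k)).map (·.2) = [k - 1] := by
  unfold evCell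
  rw [show ck - 1 + 1 = ck from by ring]
  have hbA : ((rk * n + (ck-1)) == k) = false := by
    rw [beq_eq_false_iff_ne, Ne, hkey, code_inj n rk (ck-1) rk ck (by omega) (by omega) (by omega) hckn]; omega
  have hbD : rk + 1 < n → (((rk+1) * n + (ck-1)) == k) = false := fun g3 => by
    rw [beq_eq_false_iff_ne, Ne, hkey, code_inj n (rk+1) (ck-1) rk ck (by omega) (by omega) (by omega) hckn]; omega
  have hbR : ((rk * n + ck) == k) = true := beq_iff_eq.mpr hkey.symm
  have vA : rk * n + (ck-1) = k - 1 := by rw [hkey]; ring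
  rw [if_pos hckn]
  by_cases g3 : rk + 1 < n <;> (simp [g3, hbA, hbD, hbR]) <;> simp [vA]

theorem cellF_zero (n k rk ck r c : Int) (hr : 0 ≤ r) (hrn : r < n) (hc : 0 ≤ c) (hcn : c < n)
    (hck : 0 ≤ ck) (hckn : ck < n) (hkey : k = rk * n + ck)
    (hq1 : ¬(r = rk ∧ c = ck)) (hq2 : ¬(r = rk - 1 ∧ c = ck)) (hq3 : ¬(r = rk ∧ c = ck - 1)) :
    ((evCell n r c).filter (fun e => e.1 == k)).map (·.2) = [] := by
  have hbA : ((r * n + c) == k) = false := by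
    rw [beq_eq_false_iff_ne, Ne, hkey, code_inj n r c rk ck hc hcn hck hckn]; exact hq1
  have hbD : r + 1 < n → (((r+1) * n + c) == k) = false := fun g3 => by
    rw [beq_eq_false_iff_ne, Ne, hkey, code_inj n (r+1) c rk ck hc hcn hck hckn]; omega
  have hbR : c + 1 < n → ((r * n + (c+1)) == k) = false := fun g4 => by
    rw [beq_eq_false_iff_ne, Ne, hkey, code_inj n r (c+1) rk ck (by omega) g4 hck hckn]; omega
  by_cases g3 : r + 1 < n <;> by_cases g4 : c + 1 < n <;> simp [evCell, g3, g4, hbA, hbD, hbR]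

theorem cellF_big (n k r c : Int) (hr : 0 ≤ r) (hrn : r < n) (hc : 0 ≤ c) (hcn : c < n)
    (hnk : n * n ≤ k) :
    ((evCell n r c).filter (fun e => e.1 == k)).map (·.2) = [] := by
  have hbA : ((r * n + c) == k) = false := by
    rw [beq_eq_false_iff_ne]; intro h; nlinarith
  have hbD : r + 1 < n → (((r+1) * n + c) == k) = false := fun g3 => by
    rw [beq_eq_false_iff_ne]; intro h; nlinarith
  have hbR : c + 1 < n → ((r * n + (c+1)) == k) = false := fun g4 => by
    rw [beq_eq_false_iff_ne]; intro h; nlinarith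
  by_cases g3 : r + 1 < n <;> by_cases g4 : c + 1 < n <;> simp [evCell, g3, g4, hbA, hbD, hbR]

-- ===== the filtered event stream of A at key k is exactly k's neighbor list =====

theorem filt_evAll (n k : Int) (hn : 0 ≤ n) (hk : 0 ≤ k) :
    ((evAll n).filter (fun e => e.1 == k)).map (·.2) = if k < n * n then nbrList n k else [] := by
  rw [evAll]
  simp only [List.filter_flatMap, List.map_flatMap]
  by_cases hkn : k < n * n
  · have hn0 : 0 < n := by nlinarith
    obtain ⟨hrk0, hrkn, hck0, hckn, hsum⟩ := decode_bounds n k hn0 hk hkn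
    set rk := PySem.Int.floordiv k n with hrkdef
    set ck := PySem.Int.mod k n with hckdef
    have hkey : k = rk * n + ck := hsum.symm
    rw [if_pos hkn]
    have hzrows : ∀ r, 0 ≤ r → r < n → r ≠ rk - 1 → r ≠ rk →
        (PySem.List.pyRange 0 n 1).flatMap
          (fun c => ((evCell n r c).filter (fun e => e.1 == k)).map (·.2)) = [] := by
      intro r hr0 hrn hne1 hne2
      refine flatMap_pyRange_zero _ 0 n (fun c hc0 hcn => ?_)
      exact cellF_zero n k rk ck r c hr0 hrn hc0 hcn hck0 hckn hkey
        (by omega) (by omega) (by omega)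
    rw [flatMap_pyRange_support2 _ 0 n (rk-1) rk (by omega) hrk0 hrkn hzrows]
    have hrow_up : 0 ≤ rk - 1 →
        (PySem.List.pyRange 0 n 1).flatMap
          (fun c => ((evCell n (rk-1) c).filter (fun e => e.1 == k)).map (·.2)) = [k - n] := by
      intro h1
      have hzc : ∀ c, 0 ≤ c → c < n → c ≠ ck - 1 → c ≠ ck →
          ((evCell n (rk-1) c).filter (fun e => e.1 == k)).map (·.2) = [] := by
        intro c hc0 hcn hne1 hne2
        exact cellF_zero n k rk ck (rk-1) c (by omega) (by omega) hc0 hcn hck0 hckn hkey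
          (by omega) (by omega) (by omega)
      rw [flatMap_pyRange_support2 _ 0 n (ck-1) ck (by omega) hck0 hckn hzc]
      have hmid : ((evCell n (rk-1) ck).filter (fun e => e.1 == k)).map (·.2) = [k - n] :=
        cellF_up n k rk ck (by omega) hrkn hck0 hckn hkey
      rw [hmid]
      by_cases hc1 : 0 ≤ ck - 1
      · rw [if_pos hc1,
          cellF_zero n k rk ck (rk-1) (ck-1) (by omega) (by omega) (by omega) (by omega)
            hck0 hckn hkey (by omega) (by omega) (by omega)]
        rfl
      · rw [if_neg hc1]; rfl
    have hrow_self :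
        (PySem.List.pyRange 0 n 1).flatMap
          (fun c => ((evCell n rk c).filter (fun e => e.1 == k)).map (·.2)) =
        (if 1 ≤ ck then [k - 1] else []) ++
          ((if rk + 1 < n then [k + n] else []) ++ (if ck + 1 < n then [k + 1] else [])) := by
      have hzc : ∀ c, 0 ≤ c → c < n → c ≠ ck - 1 → c ≠ ck →
          ((evCell n rk c).filter (fun e => e.1 == k)).map (·.2) = [] := by
        intro c hc0 hcn hne1 hne2
        exact cellF_zero n k rk ck rk c hrk0 hrkn hc0 hcn hck0 hckn hkey
          (by omega) (by omega) (by omega)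
      rw [flatMap_pyRange_support2 _ 0 n (ck-1) ck (by omega) hck0 hckn hzc]
      rw [cellF_self n k rk ck hck0 hckn hkey]
      by_cases hc1 : 0 ≤ ck - 1
      · rw [if_pos hc1, cellF_left n k rk ck hrk0 hrkn (by omega) hckn hkey, if_pos (by omega : 1 ≤ ck)]
      · rw [if_neg hc1, if_neg (by omega : ¬ 1 ≤ ck)]
    rw [hrow_self]
    unfold nbrList
    rw [← hrkdef, ← hckdef]
    by_cases hr1 : 0 ≤ rk - 1
    · rw [if_pos hr1, hrow_up hr1, if_pos (by omega : 1 ≤ rk)]; simp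
    · rw [if_neg hr1, if_neg (by omega : ¬ 1 ≤ rk)]; simp
  · rw [if_neg hkn]
    refine flatMap_pyRange_zero _ 0 n (fun r hr0 hrn => ?_)
    refine flatMap_pyRange_zero _ 0 n (fun c hc0 hcn => ?_)
    exact cellF_big n k r c hr0 hrn hc0 hcn (by omega)

-- ===== the dict fold =====

theorem getD_foldl_meshStep (l : List (Int × Int)) (d : PySem.Dict Int (PySem.Set Int)) (k : Int) :
    (l.foldl meshStep d).getD k [] =
      ((l.filter (fun e => e.1 == k)).map (·.2)).foldl PySem.Set.add (d.getD k []) := by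
  induction l generalizing d with
  | nil => rfl
  | cons e t ih =>
    simp only [List.foldl_cons, List.filter_cons, ih]
    by_cases he : e.1 = k
    · simp [he, meshStep, PySem.Dict.getD_modify]
    · have : (e.1 == k) = false := by simp [he]
      simp [this, meshStep, PySem.Dict.getD_modify, Ne.symm he]

theorem evAll_key_bounds (n : Int) (e : Int × Int) (he : e ∈ evAll n) : 0 ≤ e.1 ∧ e.1 < n * n := by
  rw [evAll] at he
  simp only [List.mem_flatMap] at he
  obtain ⟨r, hr, c, hc, hcell⟩ := he
  rw [PySem.List.mem_pyRange_one] at hr hc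
  obtain ⟨hr0, hrn⟩ := hr
  obtain ⟨hc0, hcn⟩ := hc
  unfold evCell at hcell
  by_cases g3 : r + 1 < n <;> by_cases g4 : c + 1 < n <;>
    simp only [g3, g4, if_true, if_false, List.mem_append, List.mem_cons,
      List.not_mem_nil, or_false, false_or] at hcell <;>
    (try rcases hcell with (rfl | rfl) | (rfl | rfl)) <;>
    exact ⟨by nlinarith, by nlinarith⟩

theorem init_items (p : Int) :
    ((PySem.List.pyRange 0 p 1).foldl (fun d i => d.insert i PySem.Set.empty)
        (PySem.Dict.empty : PySem.Dict Int (PySem.Set Int))).items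
      = (PySem.List.pyRange 0 p 1).map (fun i => (i, (PySem.Set.empty : PySem.Set Int))) := by
  have h := PySem.Dict.items_foldl_insert_fresh (d := (PySem.Dict.empty : PySem.Dict Int (PySem.Set Int)))
    (l := PySem.List.pyRange 0 p 1) (k := fun i => i) (v := fun _ => PySem.Set.empty)
    (by intro a _; exact PySem.Dict.contains_empty a)
    (by simpa using PySem.List.nodup_pyRange_one 0 p)
  simpa using h

theorem init_keys (p : Int) :
    ((PySem.List.pyRange 0 p 1).foldl (fun d i => d.insert i PySem.Set.empty)
        (PySem.Dict.empty : PySem.Dict Int (PySem.Set Int))).keys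
      = PySem.List.pyRange 0 p 1 := by
  simp only [PySem.Dict.keys, init_items, List.map_map]
  simp [Function.comp_def]

theorem keys_after_events (n : Int) (d : PySem.Dict Int (PySem.Set Int))
    (hall : ∀ e ∈ evAll n, PySem.Set.contains d.keys e.1 = true) :
    ((evAll n).foldl meshStep d).keys = d.keys := by
  unfold meshStep
  rw [PySem.Dict.keys_foldl_modify_key (l := evAll n) (key := fun e : Int × Int => e.1)
    (d0 := ([] : PySem.Set Int)) (f := fun _ e => fun s => PySem.Set.add s e.2) (d := d)]
  rw [PySem.Set.update_eq_append_filter]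
  have hnil : ((PySem.Set.ofList ((evAll n).map (·.1))).filter
      (fun y => !(PySem.Set.contains d.keys y))) = [] := by
    rw [List.filter_eq_nil_iff]
    intro y hy
    rw [PySem.Set.mem_ofList] at hy
    obtain ⟨e, he, rfl⟩ := List.mem_map.mp hy
    have hmemk : e.1 ∈ PySem.Dict.keys d := by rw [← PySem.Set.contains_iff]; exact hall e he
    simp [hmemk]
  rw [hnil, List.append_nil]

-- B's conditional Set.add chain is the plain concatenation nbrList
theorem build2dNeighbors_eq (n i : Int) (hn : 0 < n) (hi0 : 0 ≤ i) (hin : i < n * n) :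
    build2dNeighbors n i = nbrList n i := by
  obtain ⟨hr0, hrn, hc0, hcn, hkey⟩ := decode_bounds n i hn hi0 hin
  unfold build2dNeighbors nbrList
  set r := PySem.Int.floordiv i n with hr
  set c := PySem.Int.mod i n with hc
  by_cases g1 : 1 ≤ r <;> by_cases g2 : 1 ≤ c <;> by_cases g3 : r + 1 < n <;> by_cases g4 : c + 1 < n <;>
    simp only [g1, g2, g3, g4, if_true, if_false] <;>
    simp [PySem.Set.add_eq_ite, PySem.Set.empty] <;>
    (try split_ifs) <;> (try simp_all) <;> omega

-- nbrList never repeats an element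
theorem nbrList_nodup (n k : Int) (hn : 0 < n) (hk0 : 0 ≤ k) (hkn : k < n * n) :
    (nbrList n k).Nodup := by
  obtain ⟨hr0, hrn, hc0, hcn, hkey⟩ := decode_bounds n k hn hk0 hkn
  unfold nbrList
  set r := PySem.Int.floordiv k n
  set c := PySem.Int.mod k n
  split_ifs <;> simp_all <;> omega

theorem cell_fold (n r c : Int) (d : PySem.Dict Int (PySem.Set Int)) :
    (evCell n r c).foldl meshStep d =
      (let idx := r * n + c
       let d := if r + 1 < n then
           let d := d.modify idx [] (fun s => PySem.Set.add s ((r+1)*n + c))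
           d.modify ((r+1)*n + c) [] (fun s => PySem.Set.add s idx)
         else d
       let d := if c + 1 < n then
           let d := d.modify idx [] (fun s => PySem.Set.add s (r*n + (c+1)))
           d.modify (r*n + (c+1)) [] (fun s => PySem.Set.add s idx)
         else d
       d) := by
  unfold evCell meshStep
  by_cases h1 : r + 1 < n <;> by_cases h2 : c + 1 < n <;> simp [h1, h2]

theorem loop_eq_events (n : Int) (d : PySem.Dict Int (PySem.Set Int)) :
    (PySem.List.pyRange 0 n 1).foldl (fun d r =>
      (PySem.List.pyRange 0 n 1).foldl (fun d c =>
        let idx := r * n + c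
        let d := if r + 1 < n then
            let d := d.modify idx [] (fun s => PySem.Set.add s ((r+1)*n + c))
            d.modify ((r+1)*n + c) [] (fun s => PySem.Set.add s idx)
          else d
        let d := if c + 1 < n then
            let d := d.modify idx [] (fun s => PySem.Set.add s (r*n + (c+1)))
            d.modify (r*n + (c+1)) [] (fun s => PySem.Set.add s idx)
          else d
        d) d) d = (evAll n).foldl meshStep d := by
  rw [evAll, List.foldl_flatMap]
  apply PySem.List.foldl_congr_mem
  intro acc r _
  rw [List.foldl_flatMap]
  apply PySem.List.foldl_congr_mem
  intro acc' c _
  exact (cell_fold n r c acc').symm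

-- ===== VERDICT (by name: the statement is the Claim_ definition above) =====
theorem build_2d_mesh_spec : Claim_equal_build_2d_mesh := by
  intro p _ hpre
  unfold Spec_build_2d_mesh
  show ((PySem.List.pyRange 0 (Int.sqrt p) 1).foldl (fun d r =>
      (PySem.List.pyRange 0 (Int.sqrt p) 1).foldl (fun d c =>
        let idx := r * Int.sqrt p + c
        let d := if r + 1 < Int.sqrt p then
            let d := d.modify idx [] (fun s => PySem.Set.add s ((r+1) * Int.sqrt p + c))
            d.modify ((r+1) * Int.sqrt p + c) [] (fun s => PySem.Set.add s idx)
          else d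
        let d := if c + 1 < Int.sqrt p then
            let d := d.modify idx [] (fun s => PySem.Set.add s (r * Int.sqrt p + (c+1)))
            d.modify (r * Int.sqrt p + (c+1)) [] (fun s => PySem.Set.add s idx)
          else d
        d) d)
      ((PySem.List.pyRange 0 p 1).foldl (fun d i => d.insert i PySem.Set.empty)
        (PySem.Dict.empty : PySem.Dict Int (PySem.Set Int)))).items
    = (PySem.List.pyRange 0 p 1).map (fun i =>
        (i, if i < Int.sqrt p * Int.sqrt p then build2dNeighbors (Int.sqrt p) i else PySem.Set.empty))
  set n := Int.sqrt p with hndef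
  have hn0 : 0 ≤ n := Int.sqrt_nonneg p
  have hnnp : n * n ≤ p := sqrt_sq_le p hpre
  set d0 := (PySem.List.pyRange 0 p 1).foldl (fun d i => d.insert i PySem.Set.empty)
    (PySem.Dict.empty : PySem.Dict Int (PySem.Set Int)) with hd0def
  rw [loop_eq_events]
  have hkeys0 : d0.keys = PySem.List.pyRange 0 p 1 := init_keys p
  have hnk0 : d0.keys.Nodup := by rw [hkeys0]; exact PySem.List.nodup_pyRange_one 0 p
  have hall : ∀ e ∈ evAll n, PySem.Set.contains d0.keys e.1 = true := by
    intro e he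
    obtain ⟨h1, h2⟩ := evAll_key_bounds n e he
    rw [PySem.Set.contains_iff, hkeys0, PySem.List.mem_pyRange_one]
    omega
  have hkeysF : ((evAll n).foldl meshStep d0).keys = d0.keys := keys_after_events n d0 hall
  have hndF : ((evAll n).foldl meshStep d0).keys.Nodup := by rw [hkeysF]; exact hnk0
  rw [PySem.Dict.items_eq_map_keys _ hndF ([] : PySem.Set Int), hkeysF, hkeys0]
  refine List.map_congr_left (fun k hk => ?_)
  rw [PySem.List.mem_pyRange_one] at hk
  obtain ⟨hk0, hkp⟩ := hk
  have hgd0 : d0.getD k [] = [] := by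
    have hmem : (k, (PySem.Set.empty : PySem.Set Int)) ∈ d0.items := by
      rw [hd0def, init_items p]
      exact List.mem_map.mpr ⟨k, by rw [PySem.List.mem_pyRange_one]; omega, rfl⟩
    exact PySem.Dict.getD_of_mem_items d0 hmem hnk0 []
  rw [getD_foldl_meshStep, hgd0, filt_evAll n k hn0 hk0]
  by_cases hkn : k < n * n
  · have hnpos : 0 < n := by nlinarith
    rw [if_pos hkn, if_pos hkn, build2dNeighbors_eq n k hnpos hk0 hkn]
    have hfold : (nbrList n k).foldl PySem.Set.add ([] : PySem.Set Int)
        = PySem.Set.ofList (nbrList n k) := (PySem.Set.ofList_eq_foldl _).symm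
    rw [hfold, PySem.Set.ofList_eq_self_of_nodup _ (nbrList_nodup n k hnpos hk0 hkn)]
  · rw [if_neg hkn, if_neg hkn]
    rfl
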